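-- pv_equiv track=rewrite | github.com/TCoder920x/crypto-curriculum | scripts/seed-db.py | resolve_track
-- ===== SOURCE A (Python) =====
-- MODULE_TRACKS = {
--     "user": range(1, 8),
--     "power-user": range(8, 11),
--     "developer": range(11, 14),
--     "architect": range(14, 18),
-- }
--
-- def resolve_track(module_id: int) -> str:
--     """Resolve track name and return uppercase enum value for database"""
--     track_map = {
--         "user": "USER",
--         "power-user": "ANALYST",
--         "developer": "DEVELOPER",
--         "architect": "ARCHITECT",
--     }
--     for track, module_range in MODULE_TRACKS.items():
--         if module_id in module_range:
--             return track_map.get(track, "USER")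
--     return "USER"
-- ===== SOURCE B (Python) =====
-- # Precompute a flat module_id -> enum table once; lookup replaces the band loop.
-- MODULE_TRACKS = {
--     "user": range(1, 8),
--     "power-user": range(8, 11),
--     "developer": range(11, 14),
--     "architect": range(14, 18),
-- }
--
-- _BANDS = [(range(1, 8), "USER"), (range(8, 11), "ANALYST"),
--           (range(11, 14), "DEVELOPER"), (range(14, 18), "ARCHITECT")]
-- _TABLE = {n: enum for rng, enum in _BANDS for n in rng}
--
-- def resolve_track(module_id: int) -> str:
--     """Resolve track name and return uppercase enum value for database"""
--     return _TABLE.get(module_id, "USER")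
-- ===== Notes on version B (the rewrite author's own statement) =====
-- stated objective: simpler
-- what changed: Replaces the per-call scan over track bands (range membership tests in a loop plus a name->enum dict lookup) with a flat module_id->enum table precomputed once at import time, so the function body is a single dict .get with default.
import Mathlib
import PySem

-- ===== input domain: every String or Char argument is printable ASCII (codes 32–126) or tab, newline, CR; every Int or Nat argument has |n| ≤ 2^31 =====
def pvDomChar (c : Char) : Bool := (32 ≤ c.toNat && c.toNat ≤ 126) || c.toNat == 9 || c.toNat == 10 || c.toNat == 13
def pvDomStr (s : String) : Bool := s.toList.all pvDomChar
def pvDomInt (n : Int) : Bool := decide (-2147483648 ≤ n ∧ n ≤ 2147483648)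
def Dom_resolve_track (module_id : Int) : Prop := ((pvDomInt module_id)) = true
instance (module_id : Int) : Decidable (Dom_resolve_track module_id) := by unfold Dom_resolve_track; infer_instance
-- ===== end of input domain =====

-- B precomputes a flat module_id -> enum table once; the per-call band loop becomes one dict lookup with default.

-- ===== PORT A =====
-- MODULE_TRACKS: ranges represented as (track, lo, hi) with membership lo ≤ m < hi (step-1 range)
def pvModuleTracks : List (String × Int × Int) :=
  [("user", 1, 8), ("power-user", 8, 11), ("developer", 11, 14), ("architect", 14, 18)]

def pvTrackMap : PySem.Dict String String :=
  ((((PySem.Dict.empty.insert "user" "USER").insert "power-user" "ANALYST").insert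
      "developer" "DEVELOPER").insert "architect" "ARCHITECT")

-- the for-loop with early return
def pvLoopA (module_id : Int) : List (String × Int × Int) → String
  | [] => "USER"
  | (track, lo, hi) :: rest =>
      if lo ≤ module_id ∧ module_id < hi then pvTrackMap.getD track "USER"
      else pvLoopA module_id rest

def resolve_track (module_id : Int) : String := pvLoopA module_id pvModuleTracks

-- ===== PORT B =====
def pvBands : List ((Int × Int) × String) :=
  [((1, 8), "USER"), ((8, 11), "ANALYST"), ((11, 14), "DEVELOPER"), ((14, 18), "ARCHITECT")]

-- _TABLE = {n: enum for rng, enum in _BANDS for n in rng}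
def pvTable : PySem.Dict Int String :=
  pvBands.foldl
    (fun d b => (PySem.List.pyRange b.1.1 b.1.2 1).foldl (fun d n => d.insert n b.2) d)
    PySem.Dict.empty

def resolve_track_alt (module_id : Int) : String := pvTable.getD module_id "USER"

-- ===== PRECONDITION & SPEC =====
def Spec_resolve_track (module_id : Int) (out : String) : Prop := out = resolve_track_alt module_id
instance (module_id : Int) (out : String) : Decidable (Spec_resolve_track module_id out) := by unfold Spec_resolve_track; infer_instance

-- ===== CLAIM (what is proved, stated in full; the proofs are below) =====
def Claim_equal_resolve_track : Prop := ∀ (module_id : Int), Dom_resolve_track module_id → Spec_resolve_track module_id (resolve_track module_id)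

-- ===== LEMMAS AND PROOFS =====
def pvClosed (m : Int) : String :=
  if 1 ≤ m ∧ m < 8 then "USER"
  else if 8 ≤ m ∧ m < 11 then "ANALYST"
  else if 11 ≤ m ∧ m < 14 then "DEVELOPER"
  else if 14 ≤ m ∧ m < 18 then "ARCHITECT"
  else "USER"

theorem pvTable_eval : pvTable = PySem.Dict.mk
    [(1, "USER"), (2, "USER"), (3, "USER"), (4, "USER"), (5, "USER"), (6, "USER"), (7, "USER"),
     (8, "ANALYST"), (9, "ANALYST"), (10, "ANALYST"),
     (11, "DEVELOPER"), (12, "DEVELOPER"), (13, "DEVELOPER"),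
     (14, "ARCHITECT"), (15, "ARCHITECT"), (16, "ARCHITECT"), (17, "ARCHITECT")] := by
  decide

theorem pv_get?_nil (m : Int) : (PySem.Dict.mk ([] : List (Int × String))).get? m = none := by
  simp [PySem.Dict.get?]

theorem pvTM_user : pvTrackMap.getD "user" "USER" = "USER" := by decide
theorem pvTM_power : pvTrackMap.getD "power-user" "USER" = "ANALYST" := by decide
theorem pvTM_dev : pvTrackMap.getD "developer" "USER" = "DEVELOPER" := by decide
theorem pvTM_arch : pvTrackMap.getD "architect" "USER" = "ARCHITECT" := by decide

theorem pvA_eval (m : Int) : resolve_track m = pvClosed m := by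
  simp only [resolve_track, pvModuleTracks, pvLoopA, pvClosed,
    pvTM_user, pvTM_power, pvTM_dev, pvTM_arch]

theorem pvB_eval (m : Int) : resolve_track_alt m = pvClosed m := by
  rw [resolve_track_alt, pvTable_eval]
  by_cases h : 1 ≤ m ∧ m < 18
  · obtain ⟨h1, h2⟩ := h
    interval_cases m <;> decide
  · simp only [PySem.Dict.getD_eq_get?_getD, PySem.Dict.get?_mk_cons, beq_iff_eq, pv_get?_nil]
    rw [if_neg (show ¬(1 = m) by omega)]
    rw [if_neg (show ¬(2 = m) by omega)]
    rw [if_neg (show ¬(3 = m) by omega)]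
    rw [if_neg (show ¬(4 = m) by omega)]
    rw [if_neg (show ¬(5 = m) by omega)]
    rw [if_neg (show ¬(6 = m) by omega)]
    rw [if_neg (show ¬(7 = m) by omega)]
    rw [if_neg (show ¬(8 = m) by omega)]
    rw [if_neg (show ¬(9 = m) by omega)]
    rw [if_neg (show ¬(10 = m) by omega)]
    rw [if_neg (show ¬(11 = m) by omega)]
    rw [if_neg (show ¬(12 = m) by omega)]
    rw [if_neg (show ¬(13 = m) by omega)]
    rw [if_neg (show ¬(14 = m) by omega)]
    rw [if_neg (show ¬(15 = m) by omega)]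
    rw [if_neg (show ¬(16 = m) by omega)]
    rw [if_neg (show ¬(17 = m) by omega)]
    simp only [Option.getD_none, pvClosed]
    rw [if_neg (by omega), if_neg (by omega), if_neg (by omega), if_neg (by omega)]

-- ===== VERDICT (by name: the statement is the Claim_ definition above) =====
theorem resolve_track_spec : Claim_equal_resolve_track := by
  intro m _
  show resolve_track m = resolve_track_alt m
  rw [pvA_eval, pvB_eval]
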